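-- pv_equiv track=rewrite | github.com/MASD1045/Automated-Email-Processing | get_data.py | parse_into_emails
-- ===== SOURCE A (Python) =====
-- def parse_into_emails(messages):
--     """Processes raw emails into structured format."""
--     emails = [parse_raw_message(message) for message in messages]
--     return {
--         'body': map_to_list(emails, 'body'),
--         'to': map_to_list(emails, 'to'),
--         'from': map_to_list(emails, 'from'),
--         'subject': map_to_list(emails, 'subject'),
--         'date': map_to_list(emails, 'date')
--     }
--
-- def parse_raw_message(raw_message):
--     """Extracts fields from raw email text."""
--     lines = raw_message.split('\n')
--     email = {}
--     message = ''
--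
--     keys_to_extract = ['from', 'to', 'subject', 'date']
--
--     for line in lines:
--         if ':' not in line:
--             # Handle body text
--             message += line.strip() + " "  # Preserve spaces between lines
--             email['body'] = message.strip()
--         else:
--             pairs = line.split(':', 1)  # Split only at the first colon
--             key = pairs[0].lower().strip()
--             val = pairs[1].strip()
--             if key in keys_to_extract:
--                 email[key] = val
--
--     return email
--
-- def map_to_list(emails, key):
--     """Extracts a list of values for a given key."""
--     return [email.get(key, '') for email in emails]
-- ===== SOURCE B (Python) =====
-- def parse_into_emails(messages):
--     """Processes raw emails into structured format (single pass, no dicts)."""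
--     bodies, tos, froms, subjects, dates = [], [], [], [], []
--     for raw in messages:
--         frm = to = subject = date = ''
--         body_parts = []
--         for line in raw.split('\n'):
--             parts = line.split(':', 1)
--             if len(parts) == 1:
--                 body_parts.append(line.strip())
--             else:
--                 key = parts[0].lower().strip()
--                 val = parts[1].strip()
--                 if key == 'from':
--                     frm = val
--                 elif key == 'to':
--                     to = val
--                 elif key == 'subject':
--                     subject = val
--                 elif key == 'date':
--                     date = val
--         bodies.append(' '.join(body_parts).strip())
--         tos.append(to)
--         froms.append(frm)
--         subjects.append(subject)
--         dates.append(date)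
--     return {'body': bodies, 'to': tos, 'from': froms, 'subject': subjects, 'date': dates}
-- ===== Notes on version B (the rewrite author's own statement) =====
-- stated objective: simpler
-- what changed: B replaces A's two-phase pipeline (build a dict per message, then five separate map_to_list scans with .get defaults) by a single pass with no dicts: five plain accumulator lists plus four scalar header variables and a body_parts list per message, testing len(line.split(':',1))==1 instead of ':' in line, and joining/stripping the body once per message instead of A's re-strip of the growing body string at every body line.
import Mathlib
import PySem

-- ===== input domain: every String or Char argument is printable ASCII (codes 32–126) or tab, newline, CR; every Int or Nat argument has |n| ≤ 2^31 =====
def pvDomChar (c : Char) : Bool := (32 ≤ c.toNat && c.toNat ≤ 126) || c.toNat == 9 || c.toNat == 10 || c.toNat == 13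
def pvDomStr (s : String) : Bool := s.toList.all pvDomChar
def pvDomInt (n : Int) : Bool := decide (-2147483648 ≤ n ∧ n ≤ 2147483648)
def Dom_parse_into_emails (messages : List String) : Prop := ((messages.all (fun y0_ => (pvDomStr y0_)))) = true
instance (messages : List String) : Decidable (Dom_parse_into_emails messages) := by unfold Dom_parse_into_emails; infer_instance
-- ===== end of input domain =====

-- B re-implements A in one pass with five plain accumulators (no dicts, no per-key rescans of the parsed emails); equivalence is on the return value.

-- ===== PORT A =====
-- String operations are performed on code points (List Char) via PySem.Chars, exact on the ASCII domain.
-- loop body of parse_raw_message: state = (email dict, accumulated body text `message`)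
def pvStepA (st : PySem.Dict String String × List Char) (line : List Char) :
    PySem.Dict String String × List Char :=
  if PySem.Chars.isIn [':'] line = false then
    -- message += line.strip() + " "; email['body'] = message.strip()
    let msg := st.2 ++ PySem.Chars.strip line ++ [' ']
    (st.1.insert "body" (String.ofList (PySem.Chars.strip msg)), msg)
  else
    -- pairs = line.split(':', 1); pairs[0]/pairs[1] are in range since ':' is in line
    let pairs := PySem.Chars.splitOnMax line [':'] 1
    let key := String.ofList (PySem.Chars.strip (PySem.Chars.lower (PySem.List.pyGetD pairs 0 [])))
    let val := String.ofList (PySem.Chars.strip (PySem.List.pyGetD pairs 1 []))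
    if key ∈ ["from", "to", "subject", "date"] then (st.1.insert key val, st.2) else (st.1, st.2)

def parse_raw_message (raw : String) : PySem.Dict String String :=
  ((PySem.Chars.splitOn raw.toList ['\n']).foldl pvStepA (PySem.Dict.empty, [])).1

def map_to_list (emails : List (PySem.Dict String String)) (key : String) : List String :=
  emails.map (fun e => e.getD key "")

-- the returned dict literal has five distinct literal keys: its items list, in insertion order
def parse_into_emails (messages : List String) : List (String × List String) :=
  let emails := messages.map parse_raw_message
  [("body", map_to_list emails "body"), ("to", map_to_list emails "to"),
   ("from", map_to_list emails "from"), ("subject", map_to_list emails "subject"),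
   ("date", map_to_list emails "date")]

-- ===== PORT B =====
-- per-line step of Source B's inner loop: state = (frm, to, subject, date, body_parts)
-- sep ':' is a nonempty literal, so line.split(':', 1) is exactly Chars.splitOnMax
def pvStepB (st : List Char × List Char × List Char × List Char × List (List Char))
    (line : List Char) : List Char × List Char × List Char × List Char × List (List Char) :=
  let parts := PySem.Chars.splitOnMax line [':'] 1
  if parts.length = 1 then
    (st.1, st.2.1, st.2.2.1, st.2.2.2.1, st.2.2.2.2 ++ [PySem.Chars.strip line])
  else
    let key := PySem.Chars.strip (PySem.Chars.lower (PySem.List.pyGetD parts 0 []))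
    let val := PySem.Chars.strip (PySem.List.pyGetD parts 1 [])
    if key = ['f','r','o','m'] then (val, st.2.1, st.2.2.1, st.2.2.2.1, st.2.2.2.2)
    else if key = ['t','o'] then (st.1, val, st.2.2.1, st.2.2.2.1, st.2.2.2.2)
    else if key = ['s','u','b','j','e','c','t'] then (st.1, st.2.1, val, st.2.2.2.1, st.2.2.2.2)
    else if key = ['d','a','t','e'] then (st.1, st.2.1, st.2.2.1, val, st.2.2.2.2)
    else st

-- parse one raw message into (body, to, from, subject, date)
def pvParseB (raw : String) : String × String × String × String × String :=
  let st := (PySem.Chars.splitOn raw.toList ['\n']).foldl pvStepB ([], [], [], [], [])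
  (String.ofList (PySem.Chars.strip (PySem.Chars.join [' '] st.2.2.2.2)),  -- ' '.join(body_parts).strip()
   String.ofList st.2.1, String.ofList st.1, String.ofList st.2.2.1, String.ofList st.2.2.2.1)

def parse_into_emails_alt (messages : List String) : List (String × List String) :=
  let st := messages.foldl
    (fun acc raw =>
      let e := pvParseB raw
      (acc.1 ++ [e.1], acc.2.1 ++ [e.2.1], acc.2.2.1 ++ [e.2.2.1],
       acc.2.2.2.1 ++ [e.2.2.2.1], acc.2.2.2.2 ++ [e.2.2.2.2]))
    ([], [], [], [], [])
  [("body", st.1), ("to", st.2.1), ("from", st.2.2.1), ("subject", st.2.2.2.1), ("date", st.2.2.2.2)]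

-- ===== PRECONDITION & SPEC =====
def Spec_parse_into_emails (messages : List String) (out : List (String × List String)) : Prop := out = parse_into_emails_alt messages
instance (messages : List String) (out : List (String × List String)) : Decidable (Spec_parse_into_emails messages out) := by unfold Spec_parse_into_emails; infer_instance

-- ===== CLAIM (what is proved, stated in full; the proofs are below) =====
def Claim_equal_parse_into_emails : Prop := ∀ (messages : List String), Dom_parse_into_emails messages → Spec_parse_into_emails messages (parse_into_emails messages)

-- ===== LEMMAS AND PROOFS =====

-- characterisation of s.split(':', 1)
theorem pv_go_zero (fuel : Nat) (l : List Char) (acc : List (List Char)) :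
    PySem.Chars.splitOnMax.go [':'] fuel 0 l [] acc = (l :: acc).reverse := by
  cases fuel <;> cases l <;> simp [PySem.Chars.splitOnMax.go]

theorem pv_go_one (l : List Char) : ∀ (fuel : Nat) (cur : List Char) (acc : List (List Char)),
    l.length < fuel →
    PySem.Chars.splitOnMax.go [':'] fuel 1 l cur acc =
      if ':' ∈ l then
        ((l.dropWhile (· ≠ ':')).tail :: (cur.reverse ++ l.takeWhile (· ≠ ':')) :: acc).reverse
      else ((cur.reverse ++ l) :: acc).reverse := by
  induction l with
  | nil =>
    intro fuel cur acc h
    cases fuel with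
    | zero => omega
    | succ n => simp [PySem.Chars.splitOnMax.go]
  | cons c rest ih =>
    intro fuel cur acc h
    cases fuel with
    | zero => omega
    | succ n =>
      by_cases hc : c = ':'
      · subst hc
        simp [PySem.Chars.splitOnMax.go, List.isPrefixOf, pv_go_zero]
      · have : [':'].isPrefixOf (c :: rest) = false := by
          simp [List.isPrefixOf]; intro h'; exact absurd h'.symm hc
        simp only [PySem.Chars.splitOnMax.go, this]
        rw [ih n (c :: cur) acc (by simpa using Nat.lt_of_succ_lt_succ h)]
        by_cases hm : ':' ∈ rest <;>
          simp [List.takeWhile, List.dropWhile, hc, Ne.symm hc, hm]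

theorem pv_splitOnMax_colon (s : List Char) :
    PySem.Chars.splitOnMax s [':'] 1 =
      if ':' ∈ s then [s.takeWhile (· ≠ ':'), (s.dropWhile (· ≠ ':')).tail] else [s] := by
  unfold PySem.Chars.splitOnMax
  rw [if_neg (by norm_num)]
  have h1 : (1 : Int).toNat = 1 := rfl
  rw [h1, pv_go_one s (s.length + 1) [] [] (by omega)]
  by_cases hm : ':' ∈ s <;> simp [hm]

theorem pv_isIn_colon (s : List Char) : PySem.Chars.isIn [':'] s = decide (':' ∈ s) := by
  by_cases hm : ':' ∈ s
  · simp [hm, (PySem.Chars.isIn_iff_infix [':'] s).2 ((List.singleton_infix_iff ':' s).2 hm)]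
  · rw [decide_eq_false hm]
    exact (PySem.Chars.isIn_eq_false_iff [':'] s).2
      (fun h' => hm ((List.singleton_infix_iff ':' s).1 h'))

-- String.ofList identification for key comparison
theorem pv_ofList_eq (l : List Char) (s : String) : (String.ofList l = s) ↔ l = s.toList := by
  constructor
  · intro h; have := congrArg String.toList h; simpa using this
  · intro h; subst h; simp

-- ' '.join over a snoc
theorem pv_join_snoc (ps : List (List Char)) (x : List Char) (hps : ps ≠ []) :
    PySem.Chars.join [' '] (ps ++ [x]) = PySem.Chars.join [' '] ps ++ [' '] ++ x := by
  induction ps with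
  | nil => exact absurd rfl hps
  | cons a t ih =>
    cases t with
    | nil => simp [PySem.Chars.join, List.intercalate]
    | cons b u =>
      have h1 : PySem.Chars.join [' '] ((a :: b :: u) ++ [x])
          = a ++ [' '] ++ PySem.Chars.join [' '] ((b :: u) ++ [x]) := by
        simpa using PySem.Chars.join_cons_cons [' '] a b (u ++ [x])
      rw [h1, ih (by simp), PySem.Chars.join_cons_cons]
      simp

theorem pv_rstrip_snoc_space (y : List Char) :
    PySem.Chars.rstrip (y ++ [' ']) = PySem.Chars.rstrip y := by
  simp [PySem.Chars.rstrip, List.dropWhile]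
  rfl

theorem pv_strip_snoc_space (y : List Char) :
    PySem.Chars.strip (y ++ [' ']) = PySem.Chars.strip y := by
  unfold PySem.Chars.strip PySem.Chars.lstrip
  rw [List.dropWhile_append]
  by_cases h : (List.dropWhile PySem.Chars.isspace y).isEmpty
  · rw [if_pos h, List.isEmpty_iff.1 h]; rfl
  · rw [if_neg h, pv_rstrip_snoc_space]

-- the invariant tying A's per-message state to B's
def pvRel (a : PySem.Dict String String × List Char)
    (b : List Char × List Char × List Char × List Char × List (List Char)) : Prop :=
  a.1.getD "from" "" = String.ofList b.1 ∧
  a.1.getD "to" "" = String.ofList b.2.1 ∧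
  a.1.getD "subject" "" = String.ofList b.2.2.1 ∧
  a.1.getD "date" "" = String.ofList b.2.2.2.1 ∧
  a.1.getD "body" "" = String.ofList (PySem.Chars.strip a.2) ∧
  a.2 = (if b.2.2.2.2 = [] then [] else PySem.Chars.join [' '] b.2.2.2.2 ++ [' '])

theorem pv_step_rel (a : PySem.Dict String String × List Char)
    (b : List Char × List Char × List Char × List Char × List (List Char)) (line : List Char)
    (h : pvRel a b) : pvRel (pvStepA a line) (pvStepB b line) := by
  obtain ⟨hf, ht, hs, hd, hb, hm⟩ := h
  unfold pvStepA pvStepB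
  rw [pv_isIn_colon, pv_splitOnMax_colon]
  by_cases hc : ':' ∈ line
  · -- header line: both take the split branch with parts [before, after]
    rw [if_neg (show ¬(decide (':' ∈ line) = false) by simp [hc]), if_pos hc]
    dsimp only
    rw [if_neg (show ¬(([List.takeWhile (fun x => decide (x ≠ ':')) line,
        (List.dropWhile (fun x => decide (x ≠ ':')) line).tail] : List (List Char)).length = 1)
      by simp)]
    have hpy0 : PySem.List.pyGetD
        [line.takeWhile (· ≠ ':'), (line.dropWhile (· ≠ ':')).tail] (0 : Int) ([] : List Char)
        = line.takeWhile (· ≠ ':') := by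
      simp [PySem.List.pyGetD, PySem.List.pyGet?, PySem.List.pyIdx?]
    have hpy1 : PySem.List.pyGetD
        [line.takeWhile (· ≠ ':'), (line.dropWhile (· ≠ ':')).tail] (1 : Int) ([] : List Char)
        = (line.dropWhile (· ≠ ':')).tail := by
      simp [PySem.List.pyGetD, PySem.List.pyGet?, PySem.List.pyIdx?]
    rw [hpy0, hpy1]
    set key := PySem.Chars.strip (PySem.Chars.lower (line.takeWhile (· ≠ ':'))) with hkey
    set val := PySem.Chars.strip ((line.dropWhile (· ≠ ':')).tail) with hval
    by_cases k1 : key = ['f','r','o','m']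
    · rw [if_pos k1, if_pos (by rw [k1]; decide)]
      rw [k1]
      refine ⟨?_, ?_, ?_, ?_, ?_, hm⟩
      · rw [show String.ofList ['f','r','o','m'] = "from" by decide,
          PySem.Dict.getD_insert_self]
      · rw [show String.ofList ['f','r','o','m'] = "from" by decide,
          PySem.Dict.getD_insert_of_ne _ _ _ (by decide)]; exact ht
      · rw [show String.ofList ['f','r','o','m'] = "from" by decide,
          PySem.Dict.getD_insert_of_ne _ _ _ (by decide)]; exact hs
      · rw [show String.ofList ['f','r','o','m'] = "from" by decide,
          PySem.Dict.getD_insert_of_ne _ _ _ (by decide)]; exact hd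
      · rw [show String.ofList ['f','r','o','m'] = "from" by decide,
          PySem.Dict.getD_insert_of_ne _ _ _ (by decide)]; exact hb
    · rw [if_neg k1]
      by_cases k2 : key = ['t','o']
      · rw [if_pos k2, if_pos (by rw [k2]; decide)]
        rw [k2]
        refine ⟨?_, ?_, ?_, ?_, ?_, hm⟩
        · rw [show String.ofList ['t','o'] = "to" by decide,
            PySem.Dict.getD_insert_of_ne _ _ _ (by decide)]; exact hf
        · rw [show String.ofList ['t','o'] = "to" by decide,
            PySem.Dict.getD_insert_self]
        · rw [show String.ofList ['t','o'] = "to" by decide,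
            PySem.Dict.getD_insert_of_ne _ _ _ (by decide)]; exact hs
        · rw [show String.ofList ['t','o'] = "to" by decide,
            PySem.Dict.getD_insert_of_ne _ _ _ (by decide)]; exact hd
        · rw [show String.ofList ['t','o'] = "to" by decide,
            PySem.Dict.getD_insert_of_ne _ _ _ (by decide)]; exact hb
      · rw [if_neg k2]
        by_cases k3 : key = ['s','u','b','j','e','c','t']
        · rw [if_pos k3, if_pos (by rw [k3]; decide)]
          rw [k3]
          refine ⟨?_, ?_, ?_, ?_, ?_, hm⟩
          · rw [show String.ofList ['s','u','b','j','e','c','t'] = "subject" by decide,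
              PySem.Dict.getD_insert_of_ne _ _ _ (by decide)]; exact hf
          · rw [show String.ofList ['s','u','b','j','e','c','t'] = "subject" by decide,
              PySem.Dict.getD_insert_of_ne _ _ _ (by decide)]; exact ht
          · rw [show String.ofList ['s','u','b','j','e','c','t'] = "subject" by decide,
              PySem.Dict.getD_insert_self]
          · rw [show String.ofList ['s','u','b','j','e','c','t'] = "subject" by decide,
              PySem.Dict.getD_insert_of_ne _ _ _ (by decide)]; exact hd
          · rw [show String.ofList ['s','u','b','j','e','c','t'] = "subject" by decide,
              PySem.Dict.getD_insert_of_ne _ _ _ (by decide)]; exact hb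
        · rw [if_neg k3]
          by_cases k4 : key = ['d','a','t','e']
          · rw [if_pos k4, if_pos (by rw [k4]; decide)]
            rw [k4]
            refine ⟨?_, ?_, ?_, ?_, ?_, hm⟩
            · rw [show String.ofList ['d','a','t','e'] = "date" by decide,
                PySem.Dict.getD_insert_of_ne _ _ _ (by decide)]; exact hf
            · rw [show String.ofList ['d','a','t','e'] = "date" by decide,
                PySem.Dict.getD_insert_of_ne _ _ _ (by decide)]; exact ht
            · rw [show String.ofList ['d','a','t','e'] = "date" by decide,
                PySem.Dict.getD_insert_of_ne _ _ _ (by decide)]; exact hs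
            · rw [show String.ofList ['d','a','t','e'] = "date" by decide,
                PySem.Dict.getD_insert_self]
            · rw [show String.ofList ['d','a','t','e'] = "date" by decide,
                PySem.Dict.getD_insert_of_ne _ _ _ (by decide)]; exact hb
          · rw [if_neg k4]
            rw [if_neg ?_]
            · exact ⟨hf, ht, hs, hd, hb, hm⟩
            · intro hmem
              have e1 : ("from" : String).toList = ['f','r','o','m'] := by decide
              have e2 : ("to" : String).toList = ['t','o'] := by decide
              have e3 : ("subject" : String).toList = ['s','u','b','j','e','c','t'] := by decide
              have e4 : ("date" : String).toList = ['d','a','t','e'] := by decide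
              simp only [List.mem_cons, List.not_mem_nil, or_false] at hmem
              rcases hmem with h' | h' | h' | h'
              · exact k1 (by rw [(pv_ofList_eq key _).1 h', e1])
              · exact k2 (by rw [(pv_ofList_eq key _).1 h', e2])
              · exact k3 (by rw [(pv_ofList_eq key _).1 h', e3])
              · exact k4 (by rw [(pv_ofList_eq key _).1 h', e4])
  · -- body line: split returns [line]; both take the body branch
    rw [if_pos (by simp [hc]), if_neg hc, if_pos (by simp)]
    dsimp only
    refine ⟨?_, ?_, ?_, ?_, ?_, ?_⟩
    · rw [PySem.Dict.getD_insert_of_ne _ _ _ (by decide)]; exact hf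
    · rw [PySem.Dict.getD_insert_of_ne _ _ _ (by decide)]; exact ht
    · rw [PySem.Dict.getD_insert_of_ne _ _ _ (by decide)]; exact hs
    · rw [PySem.Dict.getD_insert_of_ne _ _ _ (by decide)]; exact hd
    · rw [PySem.Dict.getD_insert_self]
    · by_cases hps : b.2.2.2.2 = []
      · rw [hps, hm]
        simp [hps, PySem.Chars.join, List.intercalate]
      · rw [if_neg (by simp [hps]), pv_join_snoc _ _ hps, hm, if_neg hps]

theorem pv_foldl_rel (lines : List (List Char)) :
    ∀ a b, pvRel a b → pvRel (lines.foldl pvStepA a) (lines.foldl pvStepB b) := by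
  induction lines with
  | nil => intro a b h; exact h
  | cons l t ih => intro a b h; exact ih _ _ (pv_step_rel a b l h)

theorem pv_per_raw (raw : String) :
    ((parse_raw_message raw).getD "body" "", (parse_raw_message raw).getD "to" "",
     (parse_raw_message raw).getD "from" "", (parse_raw_message raw).getD "subject" "",
     (parse_raw_message raw).getD "date" "") = pvParseB raw := by
  have h0 : pvRel (PySem.Dict.empty, ([] : List Char))
      (([] : List Char), ([] : List Char), ([] : List Char), ([] : List Char),
       ([] : List (List Char))) := by
    exact ⟨rfl, rfl, rfl, rfl, rfl, rfl⟩
  have h := pv_foldl_rel (PySem.Chars.splitOn raw.toList ['\n']) _ _ h0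
  obtain ⟨hf, ht, hs, hd, hb, hm⟩ := h
  unfold parse_raw_message pvParseB
  set st := (PySem.Chars.splitOn raw.toList ['\n']).foldl pvStepB ([], [], [], [], [])
  set sa := (PySem.Chars.splitOn raw.toList ['\n']).foldl pvStepA (PySem.Dict.empty, [])
  refine Prod.ext ?_ (Prod.ext ?_ (Prod.ext ?_ (Prod.ext ?_ ?_))) <;> simp
  · rw [hb, hm]
    by_cases hps : st.2.2.2.2 = []
    · simp [hps, PySem.Chars.join, List.intercalate]
    · rw [if_neg hps, pv_strip_snoc_space]
  · exact ht
  · exact hf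
  · exact hs
  · exact hd

-- the single-pass outer loop of B accumulates exactly the five per-field maps
theorem pv_outer (messages : List String)
    (bs ts fs ss ds : List String) :
    messages.foldl
      (fun acc raw =>
        let e := pvParseB raw
        (acc.1 ++ [e.1], acc.2.1 ++ [e.2.1], acc.2.2.1 ++ [e.2.2.1],
         acc.2.2.2.1 ++ [e.2.2.2.1], acc.2.2.2.2 ++ [e.2.2.2.2]))
      (bs, ts, fs, ss, ds) =
    (bs ++ messages.map (fun r => (pvParseB r).1),
     ts ++ messages.map (fun r => (pvParseB r).2.1),
     fs ++ messages.map (fun r => (pvParseB r).2.2.1),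
     ss ++ messages.map (fun r => (pvParseB r).2.2.2.1),
     ds ++ messages.map (fun r => (pvParseB r).2.2.2.2)) := by
  induction messages generalizing bs ts fs ss ds with
  | nil => simp
  | cons m t ih => simp [ih]

-- ===== VERDICT (by name: the statement is the Claim_ definition above) =====
theorem parse_into_emails_spec : Claim_equal_parse_into_emails := by
  intro messages _
  unfold Spec_parse_into_emails parse_into_emails parse_into_emails_alt map_to_list
  rw [pv_outer]
  simp only [List.map_map, List.nil_append]
  have hcomp : ∀ (f : String × String × String × String × String → String),
      messages.map (fun r => f (pvParseB r)) =
      messages.map (fun r => f ((parse_raw_message r).getD "body" "",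
        (parse_raw_message r).getD "to" "", (parse_raw_message r).getD "from" "",
        (parse_raw_message r).getD "subject" "", (parse_raw_message r).getD "date" "")) := by
    intro f
    refine List.map_congr_left (fun r _ => ?_)
    rw [pv_per_raw]
  rw [hcomp (fun e => e.1), hcomp (fun e => e.2.1), hcomp (fun e => e.2.2.1),
     hcomp (fun e => e.2.2.2.1), hcomp (fun e => e.2.2.2.2)]
  simp [Function.comp]
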